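-- pv_equiv track=rewrite | github.com/Aritrya07/3rd-Sem | python lab/offline lab/08.12.21/p13.py | isFermat
-- ===== SOURCE A (Python) =====
-- def isFermat(n):
--     i = 0
--     while(1):
--         r = (2**(2**i)) + 1
--         if r==n:
--             return True
--         elif r>n:
--             return False
--         i = i + 1
--
-- x = i = 0
-- ===== SOURCE B (Python) =====
-- def isFermat(n):
--     # closed-form bit-structure test: n is Fermat iff n-1 = 2^(2^i)
--     m = n - 1
--     if m < 2:
--         return False
--     if m & (m - 1) != 0:        # m must be a power of two
--         return False
--     k = m.bit_length() - 1      # m = 2^k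
--     return k & (k - 1) == 0     # k must be a power of two (k >= 1 here)
-- ===== Notes on version B (the rewrite author's own statement) =====
-- stated objective: alternative
-- what changed: Replaces the unbounded loop generating Fermat candidates 2^(2^i)+1 with a direct bit-structure test: n-1 must be a power of two whose exponent is itself a power of two.
import Mathlib
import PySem

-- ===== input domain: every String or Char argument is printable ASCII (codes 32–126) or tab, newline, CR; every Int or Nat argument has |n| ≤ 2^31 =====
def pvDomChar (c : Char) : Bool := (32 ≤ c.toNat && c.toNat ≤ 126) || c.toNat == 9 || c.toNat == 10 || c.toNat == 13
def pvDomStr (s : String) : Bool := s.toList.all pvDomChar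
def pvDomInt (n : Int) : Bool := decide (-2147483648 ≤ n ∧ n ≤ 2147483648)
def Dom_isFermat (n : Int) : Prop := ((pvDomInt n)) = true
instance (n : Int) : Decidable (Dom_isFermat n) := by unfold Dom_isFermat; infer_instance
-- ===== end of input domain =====

-- B replaces A's loop over Fermat candidates 2^(2^i)+1 by a direct bit-structure
-- test on n-1 (alternative algorithm; return values agree on the whole domain).

-- ===== PORT A =====
-- the while(1) loop of A, on the loop counter i
def isFermatLoop (n : Int) (i : Nat) : Bool :=
  let r : Int := 2 ^ (2 ^ i) + 1
  if r = n then true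
  else if r > n then false
  else isFermatLoop n (i + 1)
termination_by (n.toNat + 1) - 2 ^ (2 ^ i)
decreasing_by
  rename_i h1 h2
  have hlt : (2 : Int) ^ (2 ^ i) + 1 < n := lt_of_le_of_ne (not_lt.mp h2) h1
  have hc : ((2 ^ (2 ^ i) : Nat) : Int) + 1 < n := by push_cast; exact hlt
  have hp : (2 : Nat) ^ (2 ^ i) < 2 ^ (2 ^ (i + 1)) :=
    Nat.pow_lt_pow_right one_lt_two (Nat.pow_lt_pow_right one_lt_two (Nat.lt_succ_self i))
  omega

def isFermat (n : Int) : Bool := isFermatLoop n 0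

-- ===== PORT B =====
def isFermat_alt (n : Int) : Bool :=
  let m := n - 1
  if m < 2 then false
  else if PySem.Int.band m (m - 1) ≠ 0 then false
  else
    let k : Int := (PySem.Int.bitLength m : Int) - 1   -- m.bit_length() - 1
    PySem.Int.band k (k - 1) == 0

-- ===== PRECONDITION & SPEC =====
def Spec_isFermat (n : Int) (out : Bool) : Prop := out = isFermat_alt n
instance (n : Int) (out : Bool) : Decidable (Spec_isFermat n out) := by unfold Spec_isFermat; infer_instance

-- ===== CLAIM (what is proved, stated in full; the proofs are below) =====
def Claim_equal_isFermat : Prop := ∀ (n : Int), Dom_isFermat n → Spec_isFermat n (isFermat n)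

-- ===== LEMMAS AND PROOFS =====

-- within the domain only the first five Fermat numbers are reachable
def pvFermatSet (n : Int) : Bool := n == 3 || n == 5 || n == 17 || n == 257 || n == 65537

lemma loop_big (n : Int) (hn : n ≤ 2147483648) (i : Nat) (hi : 5 ≤ i) :
    isFermatLoop n i = false := by
  rw [isFermatLoop]
  have h32 : (2 : Nat) ^ 5 ≤ 2 ^ i := Nat.pow_le_pow_right (by norm_num) hi
  have h2 : (2 : Int) ^ (2 ^ 5 : Nat) ≤ 2 ^ (2 ^ i) :=
    pow_le_pow_right₀ (by norm_num) h32
  have hbig : (2 : Int) ^ (2 ^ i) + 1 > n := by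
    have : (2 : Int) ^ (2 ^ 5 : Nat) = 4294967296 := by norm_num
    omega
  split_ifs with ha
  · omega
  · rfl

lemma loopA_char (n : Int) (hn : n ≤ 2147483648) :
    isFermat n = pvFermatSet n := by
  unfold isFermat
  rw [isFermatLoop, isFermatLoop, isFermatLoop, isFermatLoop, isFermatLoop,
      loop_big n hn 5 (le_refl 5)]
  simp only [pvFermatSet]
  norm_num
  rw [Bool.eq_iff_iff]
  simp only [Bool.or_eq_true, Bool.and_eq_true, Bool.not_eq_true',
    decide_eq_true_eq, decide_eq_false_iff_not, beq_iff_eq, not_lt]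
  omega

-- a bit that is set in both m and m-1 when m is not a power of two
lemma testBit_of_between {x k : Nat} (h1 : 2 ^ k ≤ x) (h2 : x < 2 ^ (k + 1)) :
    x.testBit k = true := by
  have hd : x / 2 ^ k = 1 := Nat.div_eq_of_lt_le (by omega) (by rw [pow_succ] at h2; omega)
  simp [Nat.testBit, Nat.shiftRight_eq_div_pow, hd]

-- m & (m-1) = 0 forces m to be a power of two
lemma pow_two_of_land_zero {m : Nat} (hm : 1 ≤ m) (h : m &&& (m - 1) = 0) :
    ∃ k, m = 2 ^ k := by
  by_contra hne
  rw [not_exists] at hne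
  -- locate the top bit of m
  obtain ⟨k, hk1, hk2⟩ : ∃ k, 2 ^ k ≤ m ∧ m < 2 ^ (k + 1) := by
    refine ⟨Nat.log2 m, ?_, ?_⟩
    · exact Nat.log2_self_le (by omega)
    · exact Nat.lt_log2_self
  have hne' : m ≠ 2 ^ k := hne k
  have hb1 : m.testBit k = true := testBit_of_between hk1 hk2
  have hb2 : (m - 1).testBit k = true := testBit_of_between (by omega) (by omega)
  have : (m &&& (m - 1)).testBit k = true := by
    rw [Nat.testBit_land, hb1, hb2]; rfl
  rw [h] at this
  simp at this

-- bit_length of a power of two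
lemma bitLength_pow_two (k : Nat) :
    PySem.Int.bitLength ((2 ^ k : Nat) : Int) = k + 1 := by
  induction k with
  | zero => decide
  | succ k ih =>
    rw [PySem.Int.bitLength_natCast (by positivity)]
    have h : (2 : Nat) ^ (k + 1) / 2 = 2 ^ k := by simp [pow_succ]
    rw [h, ih]

lemma loopB_char (n : Int) (hlo : -2147483648 ≤ n) (hn : n ≤ 2147483648) :
    isFermat_alt n = pvFermatSet n := by
  unfold isFermat_alt
  by_cases hm : n - 1 < 2
  · simp only [hm, if_pos]
    simp [pvFermatSet]
    omega
  · rw [not_lt] at hm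
    simp only [hm.not_gt]
    obtain ⟨M, hMn⟩ : ∃ M : Nat, (M : Int) = n - 1 :=
      ⟨(n - 1).toNat, Int.toNat_of_nonneg (by omega)⟩
    have hM2 : 2 ≤ M := by omega
    have hMle : M ≤ 2147483647 := by omega
    have hband : PySem.Int.band (n - 1) (n - 1 - 1) = ((M &&& (M - 1) : Nat) : Int) := by
      rw [← hMn]
      have h1 : (M : Int) - 1 = ((M - 1 : Nat) : Int) := by omega
      rw [h1, PySem.Int.band_natCast]
    have hnM : n = (M : Int) + 1 := by omega
    by_cases hz : M &&& (M - 1) = 0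
    · -- n-1 is a power of two 2^k
      obtain ⟨k, hk⟩ := pow_two_of_land_zero (by omega) hz
      have hk1 : 1 ≤ k := by
        by_contra h
        interval_cases k <;> omega
      have hk31 : k ≤ 31 := by
        by_contra h
        have h1 : 2 ^ 32 ≤ 2 ^ k := Nat.pow_le_pow_right (by norm_num) (by omega)
        have h2 : (2 : Nat) ^ 32 = 4294967296 := by norm_num
        omega
      have hbl : PySem.Int.bitLength (n - 1) = k + 1 := by
        rw [← hMn, hk]; exact bitLength_pow_two k
      have hc : ¬(((M &&& (M - 1) : Nat) : Int) ≠ 0) := by simp [hz]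
      rw [hband, if_neg hc, hbl]
      have hkc : ((k + 1 : Nat) : Int) - 1 = ((k : Nat) : Int) := by omega
      have hkc2 : ((k : Nat) : Int) - 1 = ((k - 1 : Nat) : Int) := by omega
      rw [hkc, hkc2, PySem.Int.band_natCast]
      have hnval : n = ((2 ^ k : Nat) : Int) + 1 := by omega
      subst hnval
      interval_cases k <;> decide
    · -- n-1 is not a power of two: both sides false
      have hc : ((M &&& (M - 1) : Nat) : Int) ≠ 0 := by exact_mod_cast hz
      rw [hband, if_pos hc]
      subst hnM
      symm
      simp only [pvFermatSet, if_false, Bool.or_eq_false_iff]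
      refine ⟨⟨⟨⟨?_, ?_⟩, ?_⟩, ?_⟩, ?_⟩ <;>
      · simp only [beq_eq_false_iff_ne, ne_eq]
        intro h
        have hM' : M = 2 ∨ M = 4 ∨ M = 16 ∨ M = 256 ∨ M = 65536 := by omega
        rcases hM' with h' | h' | h' | h' | h' <;> subst h' <;> simp_all

-- ===== VERDICT (by name: the statement is the Claim_ definition above) =====
theorem isFermat_spec : Claim_equal_isFermat := by
  intro n hd
  unfold Dom_isFermat pvDomInt at hd
  simp only [decide_eq_true_eq] at hd
  unfold Spec_isFermat
  rw [loopA_char n hd.2, loopB_char n hd.1 hd.2]
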